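-- pv_equiv track=rewrite | github.com/koba925/alds | atcoder/AGC040/A.py | solve_mine
-- ===== SOURCE A (Python) =====
-- def solve_mine(S):
--     N = len(S) + 1
--     a = [0] + [0] * N + [0]         # 1-based + centinel
--     S = ">" + S + "<"               # centinel
--     for i in range(1, N + 1):
--         if S[i - 1] == "<":
--             a[i] = a[i - 1] + 1
--     for i in reversed(range(1, N + 1)):
--         if S[i] == ">":
--             a[i] = max(a[i], a[i + 1] + 1)
--     return sum(a)
-- ===== SOURCE B (Python) =====
-- def solve_mine(S):
--     # Run-based: each maximal run of '<' or '>' of length L contributes L*(L+1)//2;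
--     # at each '<'-run immediately followed by a '>'-run subtract min of the two lengths
--     # (the peak position is counted in both staircases but must count only once).
--     total = 0
--     i = 0
--     n = len(S)
--     while i < n:
--         c = S[i]
--         j = i + 1
--         while j < n and S[j] == c:
--             j += 1
--         L = j - i
--         if c == '<':
--             total += L * (L + 1) // 2
--             k = j
--             while k < n and S[k] == '>':
--                 k += 1
--             total -= min(L, k - j)
--         elif c == '>':
--             total += L * (L + 1) // 2
--         i = j
--     return total
-- ===== Notes on version B (the rewrite author's own statement) =====
-- stated objective: alternative
-- what changed: Replaces the two index-based array passes (forward '<' staircase, backward '>' max-pass over a sentinel-padded position array) with a single left-to-right scan over maximal character runs using the closed form L*(L+1)//2 per '<' or '>' run minus min(L,R) at each '<'-run/'>'-run junction; no position array, no sentinels, no backward pass.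
import Mathlib
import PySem

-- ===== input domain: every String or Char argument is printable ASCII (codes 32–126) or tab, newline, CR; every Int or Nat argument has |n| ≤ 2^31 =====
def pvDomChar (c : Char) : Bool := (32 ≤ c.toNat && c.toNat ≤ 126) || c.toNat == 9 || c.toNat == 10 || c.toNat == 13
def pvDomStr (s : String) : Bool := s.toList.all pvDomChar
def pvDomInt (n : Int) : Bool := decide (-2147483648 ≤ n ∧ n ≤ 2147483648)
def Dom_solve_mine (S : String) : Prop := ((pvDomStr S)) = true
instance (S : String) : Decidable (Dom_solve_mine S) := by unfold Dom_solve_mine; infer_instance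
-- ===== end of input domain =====

-- B replaces A's two sentinel-padded index/array passes by a single scan over maximal
-- character runs (closed-form L*(L+1)//2 per '<'/'>' run, minus min(L,R) at each '<>' peak).


-- ===== PORT A =====
-- Python string indexing S[i] is modelled on the character list; every index the two
-- loops use is provably in range, so the total forms pyGetD/pySetD are exact here.
def solve_mine (S : String) : Int :=
  let N : Int := PySem.Str.len S + 1
  let a : List Int := [0] ++ List.replicate N.toNat 0 ++ [0]     -- [0] + [0]*N + [0]
  let t : List Char := '>' :: (S.toList ++ ['<'])                 -- S = ">" + S + "<"
  let a1 : List Int := (PySem.List.pyRange 1 (N + 1) 1).foldl (fun a i =>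
      if PySem.List.pyGetD t (i - 1) ' ' = '<' then
        PySem.List.pySetD a i (PySem.List.pyGetD a (i - 1) 0 + 1)
      else a) a
  let a2 : List Int := ((PySem.List.pyRange 1 (N + 1) 1).reverse).foldl (fun a i =>
      if PySem.List.pyGetD t i ' ' = '>' then
        PySem.List.pySetD a i (max (PySem.List.pyGetD a i 0) (PySem.List.pyGetD a (i + 1) 0 + 1))
      else a) a1
  a2.sum

-- ===== PORT B =====
-- length of the maximal leading run of character c (Source B's inner `while` scans)
def countRun (c : Char) : List Char → Nat
  | [] => 0
  | d :: ds => if d = c then countRun c ds + 1 else 0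

def altGo : List Char → Int
  | [] => 0
  | c :: cs =>
    let m := countRun c cs
    let L : Int := (m : Int) + 1
    let rest := cs.drop m
    (if c = '<' then
        PySem.Int.floordiv (L * (L + 1)) 2 - min L ((countRun '>' rest : Nat) : Int)
      else if c = '>' then
        PySem.Int.floordiv (L * (L + 1)) 2
      else 0)
      + altGo rest
termination_by s => s.length
decreasing_by simp

def solve_mine_alt (S : String) : Int := altGo S.toList

-- ===== PRECONDITION & SPEC =====
def Spec_solve_mine (S : String) (out : Int) : Prop := out = solve_mine_alt S
instance (S : String) (out : Int) : Decidable (Spec_solve_mine S out) := by unfold Spec_solve_mine; infer_instance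

-- ===== CLAIM (what is proved, stated in full; the proofs are below) =====
def Claim_equal_solve_mine : Prop := ∀ (S : String), Dom_solve_mine S → Spec_solve_mine S (solve_mine S)

-- ===== LEMMAS AND PROOFS =====


-- l-values threaded with the incoming '<'-streak u, paired with the character that
-- position sees in the second pass (sentinel '<' appended): pairs[p] = (l_p, t_{p+1}).
def pvPairs (u : Int) : List Char → List (Int × Char)
  | [] => [(u, '<')]
  | c :: cs => (u, c) :: pvPairs (if c = '<' then u + 1 else 0) cs

-- A's backward pass, functionally: value of each position from the right.
def pvRpass : List (Int × Char) → List Int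
  | [] => []
  | (lv, c) :: rest =>
    let r := pvRpass rest
    (if c = '>' then max lv (r.headD 0 + 1) else lv) :: r

-- pvT j = 0 + 1 + ... + (j-1)
def pvT : Nat → Int
  | 0 => 0
  | j + 1 => pvT j + j

theorem pv_gl : (('>':Char) = '<') = False := by decide
theorem pv_lg : (('<':Char) = '>') = False := by decide
theorem pv_length_pairs (u : Int) (s : List Char) : (pvPairs u s).length = s.length + 1 := by
  induction s generalizing u with
  | nil => rfl
  | cons c cs ih => simp [pvPairs, ih]

theorem pv_map_snd_pairs (u : Int) (s : List Char) :
    (pvPairs u s).map (·.2) = s ++ ['<'] := by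
  induction s generalizing u with
  | nil => rfl
  | cons c cs ih => simp [pvPairs, ih]

theorem pv_fst_getD_succ (s : List Char) (u : Int) (k : Nat) (hk : k < s.length) :
    ((pvPairs u s).map (·.1)).getD (k + 1) 0 =
      if s.getD k ' ' = '<' then ((pvPairs u s).map (·.1)).getD k 0 + 1 else 0 := by
  induction s generalizing u k with
  | nil => simp at hk
  | cons c cs ih =>
    cases k with
    | zero => cases cs <;> simp [pvPairs]
    | succ k =>
      simp only [pvPairs, List.map_cons, List.getD_cons_succ, List.getD_cons_succ]
      exact ih (if c = '<' then u + 1 else 0) k (by simpa using hk)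

theorem pv_countRun_nonneg (c : Char) (s : List Char) : (0:Int) ≤ (countRun c s : Int) := by
  positivity

theorem pv_countRun_eq_zero (c : Char) (s : List Char)
    (h : ∀ d ∈ s.head?, d ≠ c) : countRun c s = 0 := by
  cases s with
  | nil => rfl
  | cons d ds => simp only [countRun]; rw [if_neg]; exact (h d (by simp))

theorem pv_countRun_replicate_append (c : Char) (j : Nat) (rest : List Char) :
    countRun c (List.replicate j c ++ rest) = j + countRun c rest := by
  induction j with
  | zero => simp
  | succ j ih => simp [List.replicate_succ, countRun, ih]; omega

theorem pv_countRun_le (c : Char) (s : List Char) : countRun c s ≤ s.length := by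
  induction s with
  | nil => simp [countRun]
  | cons d ds ih =>
    simp only [countRun]
    split
    · simp; omega
    · simp

theorem pv_take_countRun (c : Char) (s : List Char) :
    s.take (countRun c s) = List.replicate (countRun c s) c := by
  induction s with
  | nil => simp [countRun]
  | cons d ds ih =>
    simp only [countRun]
    by_cases h : d = c
    · simp [h, List.replicate_succ, ih]
    · simp [h]

theorem pv_drop_countRun_head (c : Char) (s : List Char) :
    ∀ d ∈ (s.drop (countRun c s)).head?, d ≠ c := by
  induction s with
  | nil => simp
  | cons e es ih =>
    simp only [countRun]
    by_cases h : e = c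
    · simpa [h] using ih
    · simp [h]

theorem pv_rpass_head_count (s : List Char) :
    (pvRpass (pvPairs 0 s)).headD 0 = ((countRun '>' s : Nat) : Int) := by
  induction s with
  | nil => simp [pvPairs, pvRpass, countRun]
  | cons c cs ih =>
    have h0 : (0:Int) ≤ (countRun '>' cs : Int) := pv_countRun_nonneg _ _
    by_cases h : c = '>'
    · subst h
      simp only [pvPairs, pvRpass, countRun, pv_gl, if_true, if_false,
        List.headD_cons, ih]
      push_cast
      omega
    · simp only [pvPairs, pvRpass, countRun, List.headD_cons]
      rw [if_neg h, if_neg h]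
      simp

theorem pv_runL (j : Nat) (u : Int) (rest : List Char) :
    (pvRpass (pvPairs u (List.replicate j '<' ++ rest))).sum
      = j * u + pvT j + (pvRpass (pvPairs (u + j) rest)).sum := by
  induction j generalizing u with
  | zero => simp [pvT]
  | succ j ih =>
    simp only [List.replicate_succ, List.cons_append, pvPairs, pvRpass,
      pv_lg, if_true, if_false, List.sum_cons]
    rw [ih (u + 1), show u + 1 + (j:Int) = u + (((j+1 : Nat)) : Int) by push_cast; ring]
    simp only [pvT]
    push_cast
    ring

theorem pv_p1 (v : Int) (rest : List Char) (hv : 0 ≤ v)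
    (h : ∀ d ∈ rest.head?, d ≠ '<') :
    (pvRpass (pvPairs v rest)).sum =
      max v ((countRun '>' rest : Nat) : Int) - ((countRun '>' rest : Nat) : Int)
        + (pvRpass (pvPairs 0 rest)).sum := by
  cases rest with
  | nil =>
    simp [pvPairs, pvRpass, countRun]
    omega
  | cons d ds =>
    have hd : d ≠ '<' := h d (by simp)
    have h0 : (0:Int) ≤ (countRun '>' ds : Int) := pv_countRun_nonneg _ _
    by_cases hg : d = '>'
    · subst hg
      simp only [pvPairs, pvRpass, countRun, pv_gl, if_true, if_false,
        List.sum_cons, pv_rpass_head_count]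
      push_cast
      omega
    · simp only [pvPairs, pvRpass, countRun]
      rw [if_neg hd, if_neg hd, if_neg hg, if_neg hg, if_neg hg]
      simp only [List.sum_cons]
      omega

theorem pv_runG (j : Nat) (rest : List Char) (h : ∀ d ∈ rest.head?, d ≠ '>') :
    (pvRpass (pvPairs 0 (List.replicate j '>' ++ rest))).sum
      = pvT (j + 1) + (pvRpass (pvPairs 0 rest)).sum := by
  induction j with
  | zero => simp [pvT]
  | succ j ih =>
    simp only [List.replicate_succ, List.cons_append, pvPairs, pvRpass,
      pv_gl, if_true, if_false, List.sum_cons]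
    rw [pv_rpass_head_count, pv_countRun_replicate_append,
        pv_countRun_eq_zero '>' rest h, ih]
    simp [pvT]
    omega

theorem pv_runO (j : Nat) (c : Char) (rest : List Char) (h1 : c ≠ '<') (h2 : c ≠ '>') :
    (pvRpass (pvPairs 0 (List.replicate j c ++ rest))).sum
      = (pvRpass (pvPairs 0 rest)).sum := by
  induction j with
  | zero => simp
  | succ j ih =>
    simp only [List.replicate_succ, List.cons_append, pvPairs, pvRpass]
    rw [if_neg h1, if_neg h2]
    simpa using ih

theorem pv_floordiv_tri (L : Nat) :
    PySem.Int.floordiv ((L : Int) * ((L : Int) + 1)) 2 = pvT (L + 1) := by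
  induction L with
  | zero => decide
  | succ L ih =>
    rw [PySem.Int.floordiv_eq_ediv_of_pos (by norm_num)] at *
    have h2 : ((L:Int) + 1) * (((L:Int) + 1) + 1)
        = (L:Int) * ((L:Int) + 1) + ((L:Int) + 1) * 2 := by ring
    push_cast
    rw [h2, Int.add_mul_ediv_right _ _ (by norm_num), ih]
    simp [pvT]

-- B's run scan computes the sum of A's backward pass.
theorem pv_main (s : List Char) : (pvRpass (pvPairs 0 s)).sum = altGo s := by
  have key : ∀ (k : Nat) (s : List Char), s.length ≤ k →
      (pvRpass (pvPairs 0 s)).sum = altGo s := by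
    intro k
    induction k with
    | zero =>
      intro s hs
      have : s = [] := List.eq_nil_of_length_eq_zero (by omega)
      subst this; simp [pvPairs, pvRpass, altGo]
    | succ k ih =>
      intro s hs
      cases s with
      | nil => simp [pvPairs, pvRpass, altGo]
      | cons c cs =>
        set m := countRun c cs with hm
        have hmle : m ≤ cs.length := pv_countRun_le c cs
        have hsplit : c :: cs = List.replicate (m + 1) c ++ cs.drop m := by
          rw [List.replicate_succ, List.cons_append]
          congr 1
          conv_lhs => rw [← List.take_append_drop m cs]
          rw [pv_take_countRun]
        have hhead : ∀ d ∈ (cs.drop m).head?, d ≠ c := pv_drop_countRun_head c cs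
        have hrest : (cs.drop m).length ≤ k := by
          simp only [List.length_drop]
          simp only [List.length_cons] at hs
          omega
        have ihrest := ih (cs.drop m) hrest
        rw [altGo]
        simp only [← hm]
        by_cases h1 : c = '<'
        · subst h1
          rw [if_pos rfl]
          conv_lhs => rw [hsplit]
          rw [pv_runL (m+1) 0 (cs.drop m)]
          rw [pv_p1 ((0:Int) + (m+1:Nat)) (cs.drop m) (by push_cast; omega) (by simpa using hhead)]
          rw [ihrest]
          have hfd := pv_floordiv_tri (m+1)
          push_cast at hfd
          rw [hfd]
          have hR : (0:Int) ≤ ((countRun '>' (cs.drop m) : Nat) : Int) := pv_countRun_nonneg _ _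
          simp only [pvT]
          push_cast
          omega
        · by_cases h2 : c = '>'
          · subst h2
            rw [if_neg h1, if_pos rfl]
            conv_lhs => rw [hsplit]
            rw [pv_runG (m+1) (cs.drop m) hhead, ihrest]
            have hfd := pv_floordiv_tri (m+1)
            push_cast at hfd
            rw [hfd]
          · rw [if_neg h1, if_neg h2]
            conv_lhs => rw [hsplit]
            rw [pv_runO (m+1) c (cs.drop m) h1 h2, ihrest]
            ring
  exact key s.length s le_rfl

-- ===== the imperative passes of A =====

theorem pv_take_one (s : List Char) : ((pvPairs 0 s).map (·.1)).take 1 = [0] := by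
  cases s <;> simp [pvPairs]

theorem pv_getD_singleton_append (R : List Int) : (R ++ [0]).getD 0 0 = R.headD 0 := by
  cases R <;> simp

theorem pv_take_getD (F : List Int) (j k : Nat) (h : j < k) :
    (F.take k).getD j 0 = F.getD j 0 := by
  simp [List.getD_eq_getElem?_getD, h]

theorem pv_take_succ_getD (F : List Int) (k : Nat) (h : k < F.length) :
    F.take (k + 1) = F.take k ++ [F.getD k 0] := by
  rw [List.take_add_one, List.getElem?_eq_getElem h]
  simp [List.getD_eq_getElem?_getD, List.getElem?_eq_getElem h]

-- one step of A's forward pass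
theorem pv_lstep (s : List Char) (k : Nat) (hk : k ≤ s.length) :
    (if PySem.List.pyGetD ('>' :: (s ++ ['<'])) ((k:Int) + 1 - 1) ' ' = '<' then
        PySem.List.pySetD ([0] ++ ((pvPairs 0 s).map (·.1)).take k
            ++ List.replicate (s.length + 1 - k) 0 ++ [0]) ((k:Int) + 1)
          (PySem.List.pyGetD ([0] ++ ((pvPairs 0 s).map (·.1)).take k
            ++ List.replicate (s.length + 1 - k) 0 ++ [0]) ((k:Int) + 1 - 1) 0 + 1)
      else [0] ++ ((pvPairs 0 s).map (·.1)).take k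
            ++ List.replicate (s.length + 1 - k) 0 ++ [0])
    = [0] ++ ((pvPairs 0 s).map (·.1)).take (k + 1)
        ++ List.replicate (s.length + 1 - (k + 1)) 0 ++ [0] := by
  set F := (pvPairs 0 s).map (·.1) with hFdef
  have hF : F.length = s.length + 1 := by simp [hFdef, pv_length_pairs]
  rw [show (k:Int) + 1 - 1 = ((k:Nat) : Int) by ring,
      show (k:Int) + 1 = ((k + 1 : Nat) : Int) by push_cast; ring]
  simp only [PySem.List.pyGetD_natCast, PySem.List.pySetD_natCast]
  cases k with
  | zero =>
    rw [if_neg (by simp)]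
    rw [pv_take_one]
    simp [List.replicate_succ]
  | succ j =>
    have hjn : j < s.length := by omega
    have hchar : ('>' :: (s ++ ['<'])).getD (j + 1) ' ' = s.getD j ' ' := by
      simp only [List.getD_cons_succ]
      exact List.getD_append s ['<'] ' ' j hjn
    rw [hchar]
    have hgd : ([0] ++ F.take (j+1) ++ List.replicate (s.length + 1 - (j+1)) 0 ++ [0]).getD (j+1) 0
        = F.getD j 0 := by
      simp only [List.singleton_append, List.append_assoc]
      rw [List.getD_append _ _ _ _ (by simp [hF]; omega)]
      exact pv_take_getD F j (j+1) (by omega)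
    have hsplit : ([0] ++ F.take (j+1) ++ List.replicate (s.length + 1 - (j+1)) 0 ++ [0])
        = (0 :: F.take (j+1)) ++ (0 :: List.replicate (s.length - 1 - j) 0 ++ [0]) := by
      rw [show s.length + 1 - (j+1) = (s.length - 1 - j) + 1 by omega, List.replicate_succ]
      simp
    have hlen : (0 :: F.take (j+1)).length = j + 2 := by simp [hF]; omega
    have hrec := pv_fst_getD_succ s 0 j hjn
    by_cases hc : s.getD j ' ' = '<'
    · rw [if_pos hc, hgd, hsplit, List.set_append, if_neg (by rw [hlen]; omega), hlen]
      rw [show j + 1 + 1 - (j + 2) = 0 by omega,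
          show ((0:Int) :: List.replicate (s.length - 1 - j) (0:Int) ++ [(0:Int)]).set 0 (F.getD j 0 + 1)
             = (F.getD j 0 + 1) :: List.replicate (s.length - 1 - j) (0:Int) ++ [(0:Int)] from rfl]
      rw [pv_take_succ_getD F (j+1) (by omega), hrec, if_pos hc]
      rw [show s.length + 1 - (j + 1 + 1) = s.length - 1 - j by omega]
      simp [hFdef]
    · rw [if_neg hc, hsplit,
          pv_take_succ_getD F (j+1) (by omega), hrec, if_neg hc,
          show s.length + 1 - (j + 1 + 1) = s.length - 1 - j by omega]
      simp

theorem pv_leftInv (s : List Char) (k : Nat) (hk : k ≤ s.length + 1) :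
    (PySem.List.pyRange 1 ((k:Int) + 1) 1).foldl (fun a i =>
        if PySem.List.pyGetD ('>' :: (s ++ ['<'])) (i - 1) ' ' = '<' then
          PySem.List.pySetD a i (PySem.List.pyGetD a (i - 1) 0 + 1)
        else a)
      ([0] ++ List.replicate (s.length + 1) 0 ++ [0])
    = [0] ++ ((pvPairs 0 s).map (·.1)).take k
        ++ List.replicate (s.length + 1 - k) 0 ++ [0] := by
  induction k with
  | zero =>
    rw [show ((0:Nat):Int) + 1 = 1 by norm_num, PySem.List.pyRange_one_eq_nil le_rfl]
    simp
  | succ k ih =>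
    rw [show (((k+1:Nat)):Int) + 1 = ((k:Int) + 1) + 1 by push_cast; ring,
        PySem.List.pyRange_one_succ_right (by omega : (1:Int) ≤ (k:Int) + 1),
        List.foldl_append, ih (by omega)]
    simp only [List.foldl_cons, List.foldl_nil]
    exact pv_lstep s k (by omega)

-- one step of A's backward pass
theorem pv_rstep (s : List Char) (m : Nat) (hm : m ≤ s.length) :
    (if PySem.List.pyGetD ('>' :: (s ++ ['<'])) ((m:Int) + 1) ' ' = '>' then
        PySem.List.pySetD ([0] ++ ((pvPairs 0 s).map (·.1)).take (m+1)
            ++ pvRpass ((pvPairs 0 s).drop (m+1)) ++ [0]) ((m:Int) + 1)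
          (max (PySem.List.pyGetD ([0] ++ ((pvPairs 0 s).map (·.1)).take (m+1)
              ++ pvRpass ((pvPairs 0 s).drop (m+1)) ++ [0]) ((m:Int) + 1) 0)
            (PySem.List.pyGetD ([0] ++ ((pvPairs 0 s).map (·.1)).take (m+1)
              ++ pvRpass ((pvPairs 0 s).drop (m+1)) ++ [0]) ((m:Int) + 1 + 1) 0 + 1))
      else [0] ++ ((pvPairs 0 s).map (·.1)).take (m+1)
            ++ pvRpass ((pvPairs 0 s).drop (m+1)) ++ [0])
    = [0] ++ ((pvPairs 0 s).map (·.1)).take m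
        ++ pvRpass ((pvPairs 0 s).drop m) ++ [0] := by
  set F := (pvPairs 0 s).map (·.1) with hFdef
  have hF : F.length = s.length + 1 := by simp [hFdef, pv_length_pairs]
  have hmP : m < (pvPairs 0 s).length := by rw [pv_length_pairs]; omega
  set R := pvRpass ((pvPairs 0 s).drop (m+1)) with hRdef
  have hchar : ('>' :: (s ++ ['<'])).getD (m + 1) ' ' = (s ++ ['<']).getD m ' ' := by
    simp only [List.getD_cons_succ]
  have h1 : ((pvPairs 0 s)[m]'hmP).1 = F.getD m 0 := by
    rw [hFdef, List.getD_eq_getElem?_getD,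
        List.getElem?_eq_getElem (by simpa using hmP), Option.getD_some, List.getElem_map]
  have h2 : ((pvPairs 0 s)[m]'hmP).2 = (s ++ ['<']).getD m ' ' := by
    have := pv_map_snd_pairs 0 s
    rw [List.getD_eq_getElem?_getD, ← this,
        List.getElem?_eq_getElem (by simpa using hmP), Option.getD_some, List.getElem_map]
  have hdrop : (pvPairs 0 s).drop m = (pvPairs 0 s)[m]'hmP :: (pvPairs 0 s).drop (m+1) :=
    (List.getElem_cons_drop hmP).symm
  have hrp : pvRpass ((pvPairs 0 s).drop m)
      = (if (s ++ ['<']).getD m ' ' = '>' then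
           max (F.getD m 0) (R.headD 0 + 1) else F.getD m 0) :: R := by
    rw [hdrop]
    rcases h3 : (pvPairs 0 s)[m]'hmP with ⟨lv, ch⟩
    have hl : lv = F.getD m 0 := by rw [← h1, h3]
    have hc : ch = (s ++ ['<']).getD m ' ' := by rw [← h2, h3]
    simp only [pvRpass, hl, hc, hRdef]
  have hlt : (F.take (m+1)).length = m + 1 := by rw [List.length_take, hF]; omega
  have hltm : (F.take m).length = m := by rw [List.length_take, hF]; omega
  have hgd1 : ([0] ++ F.take (m+1) ++ R ++ [0]).getD (m+1) 0 = F.getD m 0 := by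
    simp only [List.cons_append, List.nil_append,
      List.getD_cons_succ, List.append_assoc]
    rw [List.getD_append (F.take (m+1)) (R ++ [0]) 0 m (by rw [hlt]; omega)]
    exact pv_take_getD F m (m+1) (by omega)
  have hgd2 : ([0] ++ F.take (m+1) ++ R ++ [0]).getD (m+2) 0 = R.headD 0 := by
    simp only [List.cons_append, List.nil_append,
      List.getD_cons_succ, List.append_assoc]
    rw [List.getD_append_right (F.take (m+1)) (R ++ [0]) 0 (m+1) (by rw [hlt])]
    rw [hlt, show m + 1 - (m+1) = 0 by omega]
    exact pv_getD_singleton_append R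
  have htk : F.take (m+1) = F.take m ++ [F.getD m 0] := pv_take_succ_getD F m (by omega)
  rw [show (m:Int) + 1 + 1 = ((m + 2 : Nat) : Int) by push_cast; ring,
      show (m:Int) + 1 = ((m + 1 : Nat) : Int) by push_cast; ring]
  simp only [PySem.List.pyGetD_natCast, PySem.List.pySetD_natCast]
  rw [hchar, hgd1, hgd2, hrp]
  by_cases hc : (s ++ ['<']).getD m ' ' = '>'
  · rw [if_pos hc, if_pos hc]
    have hsplit : ([0] ++ F.take (m+1) ++ R ++ [0])
        = (0 :: F.take m) ++ (F.getD m 0 :: (R ++ [0])) := by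
      rw [htk]; simp
    rw [hsplit, List.set_append, if_neg (by simp only [List.length_cons, hltm]; omega),
        show m + 1 - (0 :: F.take m).length = 0 by simp only [List.length_cons, hltm]; omega,
        show (F.getD m 0 :: (R ++ [0])).set 0 (max (F.getD m 0) (R.headD 0 + 1))
           = max (F.getD m 0) (R.headD 0 + 1) :: (R ++ [0]) from rfl]
    simp
  · rw [if_neg hc, if_neg hc, htk]
    simp

theorem pv_rightInv (s : List Char) (j m : Nat) (hjm : m + j = s.length + 1) :
    (PySem.List.pyRange ((m:Int) + 1) ((s.length:Int) + 2) 1).foldr (fun i a =>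
        if PySem.List.pyGetD ('>' :: (s ++ ['<'])) i ' ' = '>' then
          PySem.List.pySetD a i
            (max (PySem.List.pyGetD a i 0) (PySem.List.pyGetD a (i + 1) 0 + 1))
        else a)
      ([0] ++ (pvPairs 0 s).map (·.1) ++ [0])
    = [0] ++ (((pvPairs 0 s).map (·.1)).take m)
        ++ pvRpass ((pvPairs 0 s).drop m) ++ [0] := by
  induction j generalizing m with
  | zero =>
    have hm : m = s.length + 1 := by omega
    subst hm
    rw [PySem.List.pyRange_one_eq_nil (by push_cast; omega)]
    have hlen : ((pvPairs 0 s).map (·.1)).length = s.length + 1 := by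
      simp [pv_length_pairs]
    rw [List.foldr_nil,
        show (pvPairs 0 s).drop (s.length + 1) = [] by
          apply List.drop_eq_nil_of_le; rw [pv_length_pairs],
        List.take_of_length_le (by rw [hlen])]
    simp [pvRpass]
  | succ j ih =>
    rw [PySem.List.pyRange_one_cons (by omega), List.foldr_cons,
        show (m:Int) + 1 + 1 = ((m + 1 : Nat) : Int) + 1 by push_cast; ring,
        ih (m + 1) (by omega)]
    exact pv_rstep s m (by omega)

-- ===== VERDICT (by name: the statement is the Claim_ definition above) =====
theorem solve_mine_spec : Claim_equal_solve_mine := by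
  intro S _
  unfold Spec_solve_mine
  have hmain := pv_main S.toList
  have hrfull := pv_rightInv S.toList (S.toList.length + 1) 0 (by omega)
  simp only [Nat.cast_zero, zero_add, List.take_zero, List.drop_zero,
    List.append_nil] at hrfull
  simp only [solve_mine, solve_mine_alt, PySem.Str.len_eq]
  rw [show ((S.toList.length : Int) + 1).toNat = S.toList.length + 1 by omega,
      show (S.toList.length : Int) + 1 + 1 = ((S.toList.length + 1 : Nat) : Int) + 1 by
        push_cast; ring,
      pv_leftInv S.toList (S.toList.length + 1) le_rfl,
      List.take_of_length_le (by simp [pv_length_pairs]),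
      show S.toList.length + 1 - (S.toList.length + 1) = 0 from by omega]
  simp only [List.replicate_zero, List.append_nil]
  rw [List.foldl_reverse,
      show ((S.toList.length + 1 : Nat) : Int) + 1 = ((S.toList.length : Int)) + 2 by
        push_cast; ring]
  rw [hrfull]
  simpa using hmain
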